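-- pv_equiv track=rewrite | github.com/nehalkalita/Projection-based-feature-line-extractor | Code/spatial_test_GUI.py | X_range_0
-- ===== SOURCE A (Python) =====
-- def X_range_0(dim, Xmax, Ymax, Ys, X_vals, range_i):
--     Xi = 0
--     while (Xi * dim < Xmax):
--         flag1 = 0 # 1 if value found for Yi/Xi ranges
--         Yi = 0
--         while ((Yi * dim < Ymax) and (flag1 == 0)):
--             #Grid_X = [[]]
--             Y_pos = Yi
--             X_pos = Xi
--
--             dim_range = dim * X_pos
--             while ((dim_range < dim * (X_pos + 1)) and (flag1 == 0)):
--                 i = 0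
--                 if dim_range < Xmax:
--                     while ((i < len(X_vals[dim_range])) and (flag1 == 0)):
--                         if (X_vals[dim_range][i][1] >= Ys + (dim * Y_pos) and X_vals[dim_range][i][1] < Ys + (dim * (Y_pos + 1))):
--                             #Grid_X[0].append([X_vals[dim_range][i][0], X_vals[dim_range][i][1], X_vals[dim_range][i][2]])
--                             flag1 = 1
--                             range_i[Xi] = dim * Y_pos
--                         i = i + 1
--                 else:
--                     break
--                 dim_range = dim_range + 1
--             Yi = Yi + 1
--         Xi = Xi + 1
--     return 1, range_i
-- ===== SOURCE B (Python) =====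
-- def X_range_0(dim, Xmax, Ymax, Ys, X_vals, range_i):
--     # Single pass per X-block: each point's Y-band is computed directly by
--     # floor division, and the minimum qualifying band is kept.
--     # Mutates range_i in place, like the original.
--     if Xmax > 0 and Ymax > 0:
--         nblocks = -(-Xmax // dim)  # ceil(Xmax / dim)
--         for Xi in range(nblocks):
--             best = None
--             for r in range(dim * Xi, min(dim * (Xi + 1), Xmax)):
--                 for p in X_vals[r]:
--                     y = p[1]
--                     if y >= Ys:
--                         b = (y - Ys) // dim
--                         if b * dim < Ymax and (best is None or b < best):
--                             best = b
--             if best is not None: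
--                 range_i[Xi] = dim * best
--     return 1, range_i
-- ===== Notes on version B (the rewrite author's own statement) =====
-- stated objective: alternative
-- what changed: A rescans every row of an X-block once per candidate Y-band (nested band loop with a linear membership scan); B makes a single pass over each X-block's points, computes each point's band directly by floor division and keeps the minimum qualifying band (asymptotically fewer scans, though a timing run could not verify a speed-up on its input family).
-- outside the precondition, e.g. on X_range_0(1, 1, 5, 0, [[[0, 0], [9]]], [7]): A returns (1, [0]), B raises IndexError; on X_range_0(1, 2, 5, 100, [[[1, 2]], [[3, 4]]], []): A returns (1, []), B returns (1, [])
import Mathlib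
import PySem

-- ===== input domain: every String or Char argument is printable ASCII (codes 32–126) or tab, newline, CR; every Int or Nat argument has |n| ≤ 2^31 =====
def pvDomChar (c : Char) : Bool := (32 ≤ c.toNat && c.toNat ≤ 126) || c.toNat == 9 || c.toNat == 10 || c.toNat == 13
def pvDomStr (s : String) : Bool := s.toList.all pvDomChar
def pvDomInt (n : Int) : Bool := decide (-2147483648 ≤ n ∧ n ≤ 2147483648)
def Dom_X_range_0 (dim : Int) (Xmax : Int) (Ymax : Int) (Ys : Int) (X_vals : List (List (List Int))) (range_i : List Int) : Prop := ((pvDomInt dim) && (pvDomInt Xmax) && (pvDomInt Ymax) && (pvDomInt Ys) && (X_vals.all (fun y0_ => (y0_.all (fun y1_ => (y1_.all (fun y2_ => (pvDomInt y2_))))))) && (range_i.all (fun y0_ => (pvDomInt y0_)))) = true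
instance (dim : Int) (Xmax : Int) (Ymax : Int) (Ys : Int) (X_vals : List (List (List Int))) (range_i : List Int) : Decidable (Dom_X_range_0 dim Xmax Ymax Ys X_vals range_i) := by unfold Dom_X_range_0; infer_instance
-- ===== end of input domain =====

-- B replaces A's per-band rescans of each X-block by a single pass over the block's points
-- (band by floor division, keep the minimum); equivalence is about the RETURN value (both
-- Pythons mutate range_i in place identically).


-- ===== PORT A =====
-- innermost while: scan points of one row until a point lies in band Y_pos (then flag1 = 1)
def aPoints (dim : Int) (Ys : Int) (Ypos : Int) (Xi : Int) (row : List (List Int)) (ri : List Int) : Int × List Int :=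
  match row with
  | [] => (0, ri)
  | p :: rest =>
    let y := PySem.List.pyGetD p 1 0
    if Ys + dim * Ypos ≤ y ∧ y < Ys + dim * (Ypos + 1) then
      (1, PySem.List.pySetD ri Xi (dim * Ypos))
    else aPoints dim Ys Ypos Xi rest ri

-- dim_range while-loop (fuel bounds the iteration count; inside Pre_ it never runs out)
def aRows (fuel : Nat) (dim : Int) (Xmax : Int) (Ys : Int) (Ypos : Int) (Xi : Int)
    (X_vals : List (List (List Int))) (dim_range : Int) (ri : List Int) : Int × List Int :=
  match fuel with
  | 0 => (0, ri)
  | f + 1 =>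
    if dim_range < dim * (Xi + 1) then
      if dim_range < Xmax then
        match aPoints dim Ys Ypos Xi (PySem.List.pyGetD X_vals dim_range []) ri with
        | (flag, ri') =>
          if flag = 1 then (1, ri')
          else aRows f dim Xmax Ys Ypos Xi X_vals (dim_range + 1) ri'
      else (0, ri)
    else (0, ri)

-- Yi while-loop
def aY (fuel : Nat) (dim : Int) (Xmax : Int) (Ymax : Int) (Ys : Int) (Xi : Int)
    (X_vals : List (List (List Int))) (Yi : Int) (ri : List Int) : List Int :=
  match fuel with
  | 0 => ri
  | f + 1 =>
    if Yi * dim < Ymax then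
      match aRows (dim.toNat + 1) dim Xmax Ys Yi Xi X_vals (dim * Xi) ri with
      | (flag, ri') =>
        if flag = 1 then ri'
        else aY f dim Xmax Ymax Ys Xi X_vals (Yi + 1) ri'
    else ri

-- Xi while-loop
def aX (fuel : Nat) (dim : Int) (Xmax : Int) (Ymax : Int) (Ys : Int)
    (X_vals : List (List (List Int))) (Xi : Int) (ri : List Int) : List Int :=
  match fuel with
  | 0 => ri
  | f + 1 =>
    if Xi * dim < Xmax then
      aX f dim Xmax Ymax Ys X_vals (Xi + 1) (aY (Ymax.toNat + 1) dim Xmax Ymax Ys Xi X_vals 0 ri)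
    else ri

def X_range_0 (dim : Int) (Xmax : Int) (Ymax : Int) (Ys : Int) (X_vals : List (List (List Int))) (range_i : List Int) : Int × List Int :=
  (1, aX (Xmax.toNat + 1) dim Xmax Ymax Ys X_vals 0 range_i)

-- ===== PORT B =====
-- minimum qualifying band of block Xi: one pass over the block's rows and points
def bBest (dim : Int) (Xmax : Int) (Ymax : Int) (Ys : Int) (X_vals : List (List (List Int))) (Xi : Int) : Option Int :=
  (PySem.List.pyRange (dim * Xi) (min (dim * (Xi + 1)) Xmax) 1).foldl
    (fun best r =>
      (PySem.List.pyGetD X_vals r []).foldl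
        (fun best p =>
          let y := PySem.List.pyGetD p 1 0
          if Ys ≤ y then
            let b := PySem.Int.floordiv (y - Ys) dim
            if b * dim < Ymax then
              match best with
              | none => some b
              | some bb => if b < bb then some b else best
            else best
          else best)
        best)
    none

def X_range_0_alt (dim : Int) (Xmax : Int) (Ymax : Int) (Ys : Int) (X_vals : List (List (List Int))) (range_i : List Int) : Int × List Int :=
  if 0 < Xmax ∧ 0 < Ymax then
    let nblocks := -(PySem.Int.floordiv (-Xmax) dim)
    (1, (PySem.List.pyRange 0 nblocks 1).foldl
          (fun ri Xi =>
            match bBest dim Xmax Ymax Ys X_vals Xi with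
            | none => ri
            | some b => PySem.List.pySetD ri Xi (dim * b))
          range_i)
  else (1, range_i)

-- ===== PRECONDITION & SPEC =====
-- Pre_ excludes inputs where Python A diverges (dim ≤ 0 with 0 < Xmax) or raises an
-- IndexError (a scanned row index ≥ len(X_vals), a scanned point shorter than 2, or a
-- block index ≥ len(range_i) when an assignment happens); the index/length bounds are
-- closed-form over-approximations, so a few inputs on which A happens to return (the
-- raising access cut off by an earlier match, or no assignment ever made) are excluded too.
def Pre_X_range_0 (dim : Int) (Xmax : Int) (Ymax : Int) (Ys : Int) (X_vals : List (List (List Int))) (range_i : List Int) : Prop :=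
  Xmax ≤ 0 ∨ (1 ≤ dim ∧ (Ymax ≤ 0 ∨
    (Xmax ≤ (X_vals.length : Int) ∧ Xmax ≤ (range_i.length : Int) * dim ∧
      ∀ row ∈ X_vals.take Xmax.toNat, ∀ p ∈ row, 2 ≤ p.length)))
instance (dim : Int) (Xmax : Int) (Ymax : Int) (Ys : Int) (X_vals : List (List (List Int))) (range_i : List Int) : Decidable (Pre_X_range_0 dim Xmax Ymax Ys X_vals range_i) := by unfold Pre_X_range_0; infer_instance

def pvWitness_X_range_0 : Int × Int × Int × Int × List (List (List Int)) × List Int :=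
  (2, 3, 6, 0, [[[1, 5], [2, 0]], [[3, 4]], [[0, 7]]], [9, 9])

def Spec_X_range_0 (dim : Int) (Xmax : Int) (Ymax : Int) (Ys : Int) (X_vals : List (List (List Int))) (range_i : List Int) (out : Int × List Int) : Prop := out = X_range_0_alt dim Xmax Ymax Ys X_vals range_i
instance (dim : Int) (Xmax : Int) (Ymax : Int) (Ys : Int) (X_vals : List (List (List Int))) (range_i : List Int) (out : Int × List Int) : Decidable (Spec_X_range_0 dim Xmax Ymax Ys X_vals range_i out) := by unfold Spec_X_range_0; infer_instance

-- ===== CLAIM (what is proved, stated in full; the proofs are below) =====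
def Claim_equal_X_range_0 : Prop := ∀ (dim : Int) (Xmax : Int) (Ymax : Int) (Ys : Int) (X_vals : List (List (List Int))) (range_i : List Int), Dom_X_range_0 dim Xmax Ymax Ys X_vals range_i → Pre_X_range_0 dim Xmax Ymax Ys X_vals range_i → Spec_X_range_0 dim Xmax Ymax Ys X_vals range_i (X_range_0 dim Xmax Ymax Ys X_vals range_i)

-- ===== LEMMAS AND PROOFS =====


-- ---- proof-only helpers ----

-- the y-coordinate a point contributes (Python p[1])
def yval (p : List Int) : Int := PySem.List.pyGetD p 1 0

-- membership test of y in band Ypos, as A's inner comparison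
def inBq (dim : Int) (Ys : Int) (Ypos : Int) (y : Int) : Bool :=
  decide (Ys + dim * Ypos ≤ y ∧ y < Ys + dim * (Ypos + 1))

-- B's qualification test for a y-value
def qB (dim : Int) (Ymax : Int) (Ys : Int) (y : Int) : Bool :=
  decide (Ys ≤ y ∧ PySem.Int.floordiv (y - Ys) dim * dim < Ymax)

-- all y-values of block Xi, in traversal order
def Ps (dim : Int) (Xmax : Int) (X_vals : List (List (List Int))) (Xi : Int) : List Int :=
  (PySem.List.pyRange (dim * Xi) (min (dim * (Xi + 1)) Xmax) 1).flatMap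
    (fun r => (PySem.List.pyGetD X_vals r []).map yval)

-- bands of the qualifying y-values of block Xi
def bandsOf (dim : Int) (Xmax : Int) (Ymax : Int) (Ys : Int) (X_vals : List (List (List Int))) (Xi : Int) : List Int :=
  ((Ps dim Xmax X_vals Xi).filter (qB dim Ymax Ys)).map (fun y => PySem.Int.floordiv (y - Ys) dim)

def stepB (dim : Int) (Ymax : Int) (Ys : Int) (best : Option Int) (y : Int) : Option Int :=
  if Ys ≤ y then
    if PySem.Int.floordiv (y - Ys) dim * dim < Ymax then
      match best with
      | none => some (PySem.Int.floordiv (y - Ys) dim)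
      | some bb => if PySem.Int.floordiv (y - Ys) dim < bb then some (PySem.Int.floordiv (y - Ys) dim) else best
    else best
  else best

def omin : Option Int → Option Int → Option Int
  | none, b => b
  | some v, none => some v
  | some v, some w => some (min v w)

def blockUpd (dim : Int) (Xmax : Int) (Ymax : Int) (Ys : Int) (X_vals : List (List (List Int)))
    (ri : List Int) (Xi : Int) : List Int :=
  match bBest dim Xmax Ymax Ys X_vals Xi with
  | none => ri
  | some b => PySem.List.pySetD ri Xi (dim * b)

-- ---- arithmetic facts ----

theorem band_nonneg {dim Ys y : Int} (hdim : 1 ≤ dim) (h : Ys ≤ y) :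
    0 ≤ PySem.Int.floordiv (y - Ys) dim := by
  rw [PySem.Int.floordiv_eq_ediv_of_pos (by omega)]
  exact Int.ediv_nonneg (by omega) (by omega)

theorem band_eq_iff {dim Ys b y : Int} (hdim : 1 ≤ dim) (hb : 0 ≤ b) :
    (Ys + dim * b ≤ y ∧ y < Ys + dim * (b + 1)) ↔ (Ys ≤ y ∧ PySem.Int.floordiv (y - Ys) dim = b) := by
  rw [PySem.Int.floordiv_eq_iff_of_pos (show (0:Int) < dim by omega)]
  constructor
  · rintro ⟨h1, h2⟩
    have hnn : 0 ≤ dim * b := mul_nonneg (by omega) hb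
    exact ⟨by omega, by nlinarith, by nlinarith⟩
  · rintro ⟨h1, h2, h3⟩
    exact ⟨by nlinarith, by nlinarith⟩

theorem mem_bandsOf {dim Xmax Ymax Ys Xi b : Int} {X_vals : List (List (List Int))}
    (hdim : 1 ≤ dim) (hb : b ∈ bandsOf dim Xmax Ymax Ys X_vals Xi) : 0 ≤ b ∧ b * dim < Ymax := by
  simp only [bandsOf, List.mem_map, List.mem_filter, qB, decide_eq_true_eq] at hb
  obtain ⟨y, ⟨-, h1, h2⟩, rfl⟩ := hb
  exact ⟨band_nonneg hdim h1, h2⟩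

theorem bandsOf_nil_of_le {dim Xmax Ymax Ys Xi Yi : Int} {X_vals : List (List (List Int))}
    (hdim : 1 ≤ dim) (hY : Ymax ≤ Yi * dim)
    (hinv : ∀ b ∈ bandsOf dim Xmax Ymax Ys X_vals Xi, Yi ≤ b) :
    bandsOf dim Xmax Ymax Ys X_vals Xi = [] := by
  rw [List.eq_nil_iff_forall_not_mem]
  intro b hb
  obtain ⟨h0, hlt⟩ := mem_bandsOf hdim hb
  have h1 := hinv b hb
  have h2 : Yi * dim ≤ b * dim := mul_le_mul_of_nonneg_right h1 (by omega)
  omega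

-- ---- characterisation of A's loops ----

theorem aPoints_char (dim Ys Ypos Xi : Int) (row : List (List Int)) (ri : List Int) :
    aPoints dim Ys Ypos Xi row ri =
      if row.any (fun p => inBq dim Ys Ypos (yval p)) then
        (1, PySem.List.pySetD ri Xi (dim * Ypos))
      else (0, ri) := by
  induction row with
  | nil => simp [aPoints]
  | cons p t ih =>
    by_cases h : Ys + dim * Ypos ≤ PySem.List.pyGetD p 1 0 ∧ PySem.List.pyGetD p 1 0 < Ys + dim * (Ypos + 1)
    · have hb : inBq dim Ys Ypos (yval p) = true := by
        simp only [inBq, yval, decide_eq_true_eq]; exact h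
      simp [aPoints, h, hb]
    · have hb : inBq dim Ys Ypos (yval p) = false := by
        simp only [inBq, yval, decide_eq_false_iff_not]; exact h
      simp [aPoints, h, hb, ih]

theorem aRows_char (dim Xmax Ys Ypos Xi : Int) (X_vals : List (List (List Int)))
    (fuel : Nat) (dim_range : Int) (ri : List Int)
    (hf : dim * (Xi + 1) ≤ dim_range + fuel) :
    aRows fuel dim Xmax Ys Ypos Xi X_vals dim_range ri =
      if ((PySem.List.pyRange dim_range (min (dim * (Xi + 1)) Xmax) 1).flatMap
            (fun r => (PySem.List.pyGetD X_vals r []).map yval)).any (inBq dim Ys Ypos) then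
        (1, PySem.List.pySetD ri Xi (dim * Ypos))
      else (0, ri) := by
  induction fuel generalizing dim_range with
  | zero =>
    have hnil : PySem.List.pyRange dim_range (min (dim * (Xi + 1)) Xmax) 1 = [] :=
      PySem.List.pyRange_one_eq_nil (le_trans (min_le_left _ _) (by omega))
    simp [aRows, hnil]
  | succ f ih =>
    by_cases h1 : dim_range < dim * (Xi + 1)
    · by_cases h2 : dim_range < Xmax
      · have hcons := PySem.List.pyRange_one_cons (lt_min h1 h2)
        rw [hcons]
        simp only [aRows, if_pos h1, if_pos h2, aPoints_char]
        cases h3 : (PySem.List.pyGetD X_vals dim_range []).any (fun p => inBq dim Ys Ypos (yval p)) with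
        | true => simp [h3, List.flatMap_cons, List.any_append, List.any_map, Function.comp_def]
        | false =>
          simp [ih (dim_range + 1) (by omega)]
          rw [List.flatMap_cons, List.any_append]
          rw [show ((PySem.List.pyGetD X_vals dim_range []).map yval).any (inBq dim Ys Ypos)
              = false from by rw [List.any_map]; simpa [Function.comp_def] using h3]
          rw [Bool.false_or]
      · have hnil : PySem.List.pyRange dim_range (min (dim * (Xi + 1)) Xmax) 1 = [] :=
          PySem.List.pyRange_one_eq_nil (le_trans (min_le_right _ _) (by omega))
        simp [aRows, hnil, h1, h2]
    · have hnil : PySem.List.pyRange dim_range (min (dim * (Xi + 1)) Xmax) 1 = [] :=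
        PySem.List.pyRange_one_eq_nil (le_trans (min_le_left _ _) (by omega))
      simp [aRows, hnil, h1]

theorem mem_bandsOf_iff {dim Xmax Ymax Ys Xi Yi : Int} {X_vals : List (List (List Int))}
    (hdim : 1 ≤ dim) (h0 : 0 ≤ Yi) (hY : Yi * dim < Ymax) :
    ((Ps dim Xmax X_vals Xi).any (inBq dim Ys Yi) = true) ↔
      Yi ∈ bandsOf dim Xmax Ymax Ys X_vals Xi := by
  simp only [List.any_eq_true, bandsOf, List.mem_map, List.mem_filter, inBq, qB, decide_eq_true_eq]
  constructor
  · rintro ⟨y, hy, hin⟩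
    obtain ⟨hYs, hband⟩ := (band_eq_iff hdim h0).mp hin
    exact ⟨y, ⟨hy, hYs, by rw [hband]; exact hY⟩, hband⟩
  · rintro ⟨y, ⟨hy, hq1, hq2⟩, hband⟩
    exact ⟨y, hy, (band_eq_iff hdim h0).mpr ⟨hq1, hband⟩⟩

theorem aY_char (dim Xmax Ymax Ys Xi : Int) (X_vals : List (List (List Int)))
    (hdim : 1 ≤ dim) (fuel : Nat) (Yi : Int) (ri : List Int)
    (h0 : 0 ≤ Yi) (hfuel : Ymax ≤ Yi + fuel)
    (hinv : ∀ b ∈ bandsOf dim Xmax Ymax Ys X_vals Xi, Yi ≤ b) :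
    aY fuel dim Xmax Ymax Ys Xi X_vals Yi ri =
      match (bandsOf dim Xmax Ymax Ys X_vals Xi).min? with
      | some m => PySem.List.pySetD ri Xi (dim * m)
      | none => ri := by
  induction fuel generalizing Yi ri with
  | zero =>
    have hnil := bandsOf_nil_of_le (Xmax := Xmax) (X_vals := X_vals) (Xi := Xi) hdim
      (show Ymax ≤ Yi * dim from le_trans (by omega) (le_mul_of_one_le_right h0 hdim)) hinv
    rw [hnil]
    simp [aY]
  | succ f ih =>
    by_cases hg : Yi * dim < Ymax
    · simp only [aY, if_pos hg]
      rw [aRows_char dim Xmax Ys Yi Xi X_vals (dim.toNat + 1) (dim * Xi) ri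
        (by have hd : ((dim.toNat : Int)) = dim := Int.toNat_of_nonneg (by omega)
            have he : dim * (Xi + 1) = dim * Xi + dim := by ring
            push_cast
            omega)]
      rw [show (PySem.List.pyRange (dim * Xi) (min (dim * (Xi + 1)) Xmax) 1).flatMap
            (fun r => (PySem.List.pyGetD X_vals r []).map yval) = Ps dim Xmax X_vals Xi from rfl]
      cases hfound : (Ps dim Xmax X_vals Xi).any (inBq dim Ys Yi) with
      | true =>
        have hmin : (bandsOf dim Xmax Ymax Ys X_vals Xi).min? = some Yi :=
          List.min?_eq_some_iff.mpr ⟨(mem_bandsOf_iff hdim h0 hg).mp hfound, hinv⟩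
        rw [hmin]
        rfl
      | false =>
        exact ih (Yi + 1) ri (by omega) (by omega)
          (fun b hb => by
            have h1 := hinv b hb
            by_contra hcon
            have hbe : b = Yi := by omega
            have hmem := (mem_bandsOf_iff hdim h0 hg).mpr (hbe ▸ hb)
            rw [hfound] at hmem
            exact absurd hmem (by simp))
    · have hnil := bandsOf_nil_of_le (Xmax := Xmax) (X_vals := X_vals) (Xi := Xi) hdim
        (by omega) hinv
      rw [hnil]
      simp [aY, hg]

-- ---- characterisation of B's fold ----

theorem omin_none_right (a : Option Int) : omin a none = a := by cases a <;> rfl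

theorem omin_assoc (a b c : Option Int) : omin (omin a b) c = omin a (omin b c) := by
  cases a <;> cases b <;> cases c <;> simp [omin, min_assoc]

theorem min?_cons_omin (b : Int) (t : List Int) : (b :: t).min? = omin (some b) t.min? := by
  rw [List.min?_cons]
  cases t.min? <;> rfl

theorem stepB_qual {dim Ymax Ys y : Int} (acc : Option Int) (hq : qB dim Ymax Ys y = true) :
    stepB dim Ymax Ys acc y = omin acc (some (PySem.Int.floordiv (y - Ys) dim)) := by
  simp only [qB, decide_eq_true_eq] at hq
  obtain ⟨h1, h2⟩ := hq
  cases acc with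
  | none => simp [stepB, h1, h2, omin]
  | some bb =>
    simp only [stepB, if_pos h1, if_pos h2, omin]
    split_ifs with h3
    · rw [min_eq_right (by omega)]
    · rw [min_eq_left (by omega)]

theorem stepB_not_qual {dim Ymax Ys y : Int} (acc : Option Int) (hq : qB dim Ymax Ys y = false) :
    stepB dim Ymax Ys acc y = acc := by
  simp only [qB, decide_eq_false_iff_not, not_and_or] at hq
  rcases hq with h | h
  · simp [stepB, h]
  · by_cases h1 : Ys ≤ y <;> simp [stepB, h1, h]

theorem foldStep_char (dim Ymax Ys : Int) (ys : List Int) (acc : Option Int) :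
    ys.foldl (stepB dim Ymax Ys) acc =
      omin acc (((ys.filter (qB dim Ymax Ys)).map (fun y => PySem.Int.floordiv (y - Ys) dim)).min?) := by
  induction ys generalizing acc with
  | nil => simp [omin_none_right]
  | cons y t ih =>
    rw [List.foldl_cons, ih]
    by_cases hq : qB dim Ymax Ys y = true
    · rw [stepB_qual acc hq, List.filter_cons_of_pos hq, List.map_cons, min?_cons_omin, ← omin_assoc]
    · rw [stepB_not_qual acc (by simpa using hq), List.filter_cons_of_neg (by simpa using hq)]

theorem bBest_char (dim Xmax Ymax Ys : Int) (X_vals : List (List (List Int))) (Xi : Int) :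
    bBest dim Xmax Ymax Ys X_vals Xi = (bandsOf dim Xmax Ymax Ys X_vals Xi).min? := by
  have h1 : bBest dim Xmax Ymax Ys X_vals Xi = (Ps dim Xmax X_vals Xi).foldl (stepB dim Ymax Ys) none := by
    simp only [bBest, Ps, List.foldl_flatMap, List.foldl_map]
    rfl
  rw [h1, foldStep_char]
  rfl

-- ---- the outer loop ----

theorem aX_char (dim Xmax Ymax Ys : Int) (X_vals : List (List (List Int)))
    (hdim : 1 ≤ dim) (fuel : Nat) (Xi : Int) (ri : List Int)
    (h0 : 0 ≤ Xi) (hfuel : Xmax ≤ Xi + fuel) :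
    aX fuel dim Xmax Ymax Ys X_vals Xi ri =
      (PySem.List.pyRange Xi (-(PySem.Int.floordiv (-Xmax) dim)) 1).foldl
        (blockUpd dim Xmax Ymax Ys X_vals) ri := by
  obtain ⟨hN1, hN2⟩ := (PySem.Int.neg_floordiv_neg_eq_iff_of_pos (show (0:Int) < dim by omega)).mp rfl
  induction fuel generalizing Xi ri with
  | zero =>
    have hle : -(PySem.Int.floordiv (-Xmax) dim) ≤ Xi := by
      set N := -(PySem.Int.floordiv (-Xmax) dim) with hNdef
      by_cases h : 1 ≤ N
      · have : N - 1 ≤ (N - 1) * dim := le_mul_of_one_le_right (by omega) hdim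
        omega
      · omega
    rw [PySem.List.pyRange_one_eq_nil hle]
    rfl
  | succ f ih =>
    by_cases hg : Xi * dim < Xmax
    · have hXiN : Xi < -(PySem.Int.floordiv (-Xmax) dim) := by
        by_contra h
        push Not at h
        have := mul_le_mul_of_nonneg_right h (show (0:Int) ≤ dim by omega)
        omega
      simp only [aX, if_pos hg]
      rw [PySem.List.pyRange_one_cons hXiN, List.foldl_cons]
      have hbody : aY (Ymax.toNat + 1) dim Xmax Ymax Ys Xi X_vals 0 ri =
          blockUpd dim Xmax Ymax Ys X_vals ri Xi := by
        rw [aY_char dim Xmax Ymax Ys Xi X_vals hdim (Ymax.toNat + 1) 0 ri le_rfl (by omega)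
          (fun b hb => (mem_bandsOf hdim hb).1)]
        rw [blockUpd, bBest_char]
        cases (bandsOf dim Xmax Ymax Ys X_vals Xi).min? <;> rfl
      rw [hbody]
      exact ih (Xi + 1) _ (by omega) (by omega) hN1 hN2
    · have hle : -(PySem.Int.floordiv (-Xmax) dim) ≤ Xi := by
        by_contra h
        push Not at h
        have h1 : Xi ≤ -(PySem.Int.floordiv (-Xmax) dim) - 1 := by omega
        have := mul_le_mul_of_nonneg_right h1 (show (0:Int) ≤ dim by omega)
        omega
      simp only [aX, if_neg hg]
      rw [PySem.List.pyRange_one_eq_nil hle]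
      rfl

theorem bandsOf_nil_of_Ymax {dim Xmax Ymax Ys Xi : Int} {X_vals : List (List (List Int))}
    (hdim : 1 ≤ dim) (hY : Ymax ≤ 0) : bandsOf dim Xmax Ymax Ys X_vals Xi = [] := by
  rw [List.eq_nil_iff_forall_not_mem]
  intro b hb
  obtain ⟨h0, hlt⟩ := mem_bandsOf hdim hb
  have : 0 ≤ b * dim := mul_nonneg h0 (by omega)
  omega

theorem foldl_blockUpd_id (dim Xmax Ymax Ys : Int) (X_vals : List (List (List Int)))
    (hnone : ∀ Xi, bBest dim Xmax Ymax Ys X_vals Xi = none) :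
    ∀ (l : List Int) (ri : List Int), l.foldl (blockUpd dim Xmax Ymax Ys X_vals) ri = ri := by
  intro l
  induction l with
  | nil => intro ri; rfl
  | cons x t ih => intro ri; rw [List.foldl_cons, blockUpd, hnone x]; exact ih ri

-- ===== VERDICT (by name: the statement is the Claim_ definition above) =====
theorem X_range_0_spec : Claim_equal_X_range_0 := by
  intro dim Xmax Ymax Ys X_vals range_i hdom hpre
  unfold Spec_X_range_0
  by_cases hX : 0 < Xmax
  · have hdim : 1 ≤ dim := by
      rcases hpre with h | ⟨h, -⟩
      · omega
      · exact h
    simp only [X_range_0]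
    rw [aX_char dim Xmax Ymax Ys X_vals hdim (Xmax.toNat + 1) 0 range_i le_rfl (by omega)]
    by_cases hY : 0 < Ymax
    · simp only [X_range_0_alt, if_pos (And.intro hX hY)]
      rfl
    · simp only [X_range_0_alt]
      rw [if_neg (by tauto)]
      have hnone : ∀ Xi, bBest dim Xmax Ymax Ys X_vals Xi = none := by
        intro Xi
        rw [bBest_char, bandsOf_nil_of_Ymax hdim (by omega)]
        rfl
      rw [foldl_blockUpd_id dim Xmax Ymax Ys X_vals hnone]
  · simp only [X_range_0, X_range_0_alt]
    rw [show Xmax.toNat + 1 = 1 from by omega]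
    simp [aX, hX]
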